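-- pv_equiv track=rewrite | github.com/mufazzalshokh/mini_rag | app/api/ask.py | maybe_answer_filenames
-- ===== SOURCE A (Python) =====
-- def maybe_answer_filenames(question: str, context_chunks):
--     q = question.lower()
--     if any(k in q for k in ["filename", "file name", "filenames", "file names", "list the document filenames"]):
--         seen = set()
--         uniq = []
--         for i, ch in enumerate(context_chunks):
--             name = ch["source"]
--             if name not in seen:
--                 seen.add(name)
--                 ref_idx = next((j + 1 for j, c in enumerate(context_chunks) if c["source"] == name), 1)
--                 uniq.append((name, ref_idx))
--
--         lines = [f"- {name} [{idx}]" for name, idx in uniq]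
--         answer = "\n".join(lines)
--
--         citations = []
--         for i, ch in enumerate(context_chunks):
--             citations.append({"source_id": f"{ch['source']}#{i}", "snippet": ch["chunk"][:120]})
--         return answer, citations
--     return None
-- ===== SOURCE B (Python) =====
-- def maybe_answer_filenames(question: str, context_chunks):
--     q = question.lower()
--     if not any(k in q for k in ["filename", "file name", "filenames", "file names", "list the document filenames"]):
--         return None
--     seen = set()
--     lines = []
--     citations = []
--     for i, ch in enumerate(context_chunks):
--         name = ch["source"]
--         citations.append({"source_id": f"{name}#{i}", "snippet": ch["chunk"][:120]})
--         if name not in seen: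
--             seen.add(name)
--             # first occurrence of name is at index i, so its 1-based ref is i + 1
--             lines.append(f"- {name} [{i + 1}]")
--     return "\n".join(lines), citations
-- ===== Notes on version B (the rewrite author's own statement) =====
-- stated objective: simpler
-- what changed: B replaces A's per-new-filename inner rescan of all chunks (next(...) to find the first occurrence index) with the observation that a name first seen at index i has first-occurrence ref i+1, and builds the answer lines and citations in one single pass instead of A's two loops plus inner scan.
import Mathlib
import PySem

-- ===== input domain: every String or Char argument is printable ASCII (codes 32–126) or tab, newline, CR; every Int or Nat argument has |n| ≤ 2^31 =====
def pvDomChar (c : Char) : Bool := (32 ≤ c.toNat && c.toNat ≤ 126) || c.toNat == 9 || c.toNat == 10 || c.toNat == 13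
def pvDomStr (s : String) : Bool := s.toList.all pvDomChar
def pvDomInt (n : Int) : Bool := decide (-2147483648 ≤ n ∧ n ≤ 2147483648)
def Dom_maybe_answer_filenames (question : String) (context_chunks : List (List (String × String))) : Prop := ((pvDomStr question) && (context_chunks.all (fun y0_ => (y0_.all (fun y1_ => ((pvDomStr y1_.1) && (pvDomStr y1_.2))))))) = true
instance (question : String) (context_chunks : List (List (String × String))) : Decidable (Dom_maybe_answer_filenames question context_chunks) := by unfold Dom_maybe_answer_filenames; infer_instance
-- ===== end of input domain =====

-- B drops A's inner first-occurrence rescan (the ref of a name first seen at index i is i+1) and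
-- builds the answer lines and the citations in one single pass instead of A's two loops.


-- shared primitives of both ports: the keyword test (identical code in A and B) and the dict lookups
-- ch["source"] / ch["chunk"]; getD "" is exact under Pre_, which guarantees the keys are present.
def pvHasKw (question : String) : Bool :=
  let q := PySem.Str.lower question
  (["filename", "file name", "filenames", "file names", "list the document filenames"]).any
    (fun k => PySem.Str.isIn k q)

def pvSrc (ch : List (String × String)) : String := (PySem.Dict.ofList ch).getD "source" ""
def pvChunk (ch : List (String × String)) : String := (PySem.Dict.ofList ch).getD "chunk" ""

def pvCite (name : String) (i : Int) (ch : List (String × String)) : List (String × String) :=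
  [("source_id", name ++ "#" ++ PySem.Int.toStr i), ("snippet", PySem.Str.slice (pvChunk ch) none (some 120))]

def pvLine (name : String) (idx : Int) : String :=
  "- " ++ name ++ " [" ++ PySem.Int.toStr idx ++ "]"

-- ===== PORT A =====
-- next((j + 1 for j, c in enumerate(context_chunks) if c["source"] == name), 1)
def pvNextA (name : String) (j : Int) : List (List (String × String)) → Int
  | [] => 1
  | c :: rest => if pvSrc c == name then j + 1 else pvNextA name (j + 1) rest

-- the dedup loop building `uniq` (the loop variable i of A is unused by its body, so not carried)
def pvLoopA (ctx : List (List (String × String))) :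
    List (List (String × String)) → PySem.Set String → List (String × Int) → List (String × Int)
  | [], _, uniq => uniq
  | ch :: rest, seen, uniq =>
    let name := pvSrc ch
    if PySem.Set.contains seen name then pvLoopA ctx rest seen uniq
    else pvLoopA ctx rest (PySem.Set.add seen name) (uniq ++ [(name, pvNextA name 0 ctx)])

-- the citations loop of A
def pvCitesA (i : Int) : List (List (String × String)) → List (List (String × String))
  | [] => []
  | ch :: rest => pvCite (pvSrc ch) i ch :: pvCitesA (i + 1) rest

def maybe_answer_filenames (question : String) (context_chunks : List (List (String × String))) : Option (String × (List (List (String × String)))) :=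
  if pvHasKw question then
    let uniq := pvLoopA context_chunks context_chunks PySem.Set.empty []
    let lines := uniq.map (fun p => pvLine p.1 p.2)
    let answer := PySem.Str.join "\n" lines
    some (answer, pvCitesA 0 context_chunks)
  else
    none

-- ===== PORT B =====
-- single pass: citations always appended; on a fresh name the line "- name [i+1]" is appended directly
def pvLoopB (i : Int) :
    List (List (String × String)) → PySem.Set String → List String → List (List (String × String)) →
    (List String × List (List (String × String)))
  | [], _, lines, cites => (lines, cites)
  | ch :: rest, seen, lines, cites =>
    let name := pvSrc ch
    let cites' := cites ++ [pvCite name i ch]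
    if PySem.Set.contains seen name then pvLoopB (i + 1) rest seen lines cites'
    else pvLoopB (i + 1) rest (PySem.Set.add seen name) (lines ++ [pvLine name (i + 1)]) cites'

def maybe_answer_filenames_alt (question : String) (context_chunks : List (List (String × String))) : Option (String × (List (List (String × String)))) :=
  if !(pvHasKw question) then none
  else
    let r := pvLoopB 0 context_chunks PySem.Set.empty [] []
    some (PySem.Str.join "\n" r.1, r.2)

-- ===== PRECONDITION & SPEC =====
-- Pre_ excludes exactly the inputs where Python A raises KeyError: a keyword question whose
-- context contains a chunk dict missing the key "source" or "chunk".
def Pre_maybe_answer_filenames (question : String) (context_chunks : List (List (String × String))) : Prop :=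
  pvHasKw question = true →
    ∀ ch ∈ context_chunks,
      (PySem.Dict.ofList ch).contains "source" = true ∧ (PySem.Dict.ofList ch).contains "chunk" = true
instance (question : String) (context_chunks : List (List (String × String))) : Decidable (Pre_maybe_answer_filenames question context_chunks) := by unfold Pre_maybe_answer_filenames; infer_instance

def pvWitness_maybe_answer_filenames : String × (List (List (String × String))) :=
  ("list the document filenames", [[("source", "a.txt"), ("chunk", "hello")], [("source", "a.txt"), ("chunk", "bye")], [("source", "b.txt"), ("chunk", "x")]])

def Spec_maybe_answer_filenames (question : String) (context_chunks : List (List (String × String))) (out : Option (String × (List (List (String × String))))) : Prop := out = maybe_answer_filenames_alt question context_chunks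
instance (question : String) (context_chunks : List (List (String × String))) (out : Option (String × (List (List (String × String))))) : Decidable (Spec_maybe_answer_filenames question context_chunks out) := by unfold Spec_maybe_answer_filenames; infer_instance

-- ===== CLAIM (what is proved, stated in full; the proofs are below) =====
def Claim_equal_maybe_answer_filenames : Prop := ∀ (question : String) (context_chunks : List (List (String × String))), Dom_maybe_answer_filenames question context_chunks → Pre_maybe_answer_filenames question context_chunks → Spec_maybe_answer_filenames question context_chunks (maybe_answer_filenames question context_chunks)

-- ===== LEMMAS AND PROOFS =====

theorem pvLoopA_acc (ctx : List (List (String × String))) :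
    ∀ (rest : List (List (String × String))) (seen : PySem.Set String) (u : List (String × Int)),
    pvLoopA ctx rest seen u = u ++ pvLoopA ctx rest seen [] := by
  intro rest
  induction rest with
  | nil => intro seen u; simp [pvLoopA]
  | cons ch rest ih =>
      intro seen u
      simp only [pvLoopA]
      by_cases h : pvSrc ch ∈ seen
      · simp only [PySem.Set.contains_eq_listContains, List.contains_iff_mem, h, if_true]
        exact ih seen u
      · simp only [PySem.Set.contains_eq_listContains, List.contains_iff_mem, h, if_false]
        simp only [List.nil_append]
        rw [ih _ (u ++ [(pvSrc ch, pvNextA (pvSrc ch) 0 ctx)]),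
            ih _ ([(pvSrc ch, pvNextA (pvSrc ch) 0 ctx)])]
        simp

theorem pvNextA_first (name : String) :
    ∀ (pre : List (List (String × String))) (ch : List (String × String))
      (rest : List (List (String × String))) (j : Int),
    name ∉ pre.map pvSrc → pvSrc ch = name →
    pvNextA name j (pre ++ ch :: rest) = j + (pre.length : Int) + 1 := by
  intro pre
  induction pre with
  | nil =>
      intro ch rest j _ hch
      simp [pvNextA, hch]
  | cons p ps ih =>
      intro ch rest j hmem hch
      simp only [List.map_cons, List.mem_cons, not_or] at hmem
      have hne : (pvSrc p == name) = false := by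
        simp only [beq_eq_false_iff_ne]
        exact fun h => hmem.1 h.symm
      simp only [List.cons_append, pvNextA, hne, Bool.false_eq_true, if_false]
      rw [ih ch rest (j + 1) hmem.2 hch]
      simp only [List.length_cons]
      push_cast
      ring

theorem pvLoopB_eq (ctx : List (List (String × String))) :
    ∀ (rest pre : List (List (String × String))) (seen : PySem.Set String)
      (lines : List String) (cites : List (List (String × String))),
    ctx = pre ++ rest →
    (∀ n, n ∈ seen ↔ n ∈ pre.map pvSrc) →
    pvLoopB (pre.length : Int) rest seen lines cites
      = (lines ++ (pvLoopA ctx rest seen []).map (fun p => pvLine p.1 p.2),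
         cites ++ pvCitesA (pre.length : Int) rest) := by
  intro rest
  induction rest with
  | nil =>
      intro pre seen lines cites _ _
      simp [pvLoopB, pvLoopA, pvCitesA]
  | cons ch rest ih =>
      intro pre seen lines cites hctx hseen
      simp only [pvLoopB, pvLoopA, pvCitesA]
      have hlen : ((pre ++ [ch]).length : Int) = (pre.length : Int) + 1 := by
        simp
      by_cases h : pvSrc ch ∈ seen
      · have hseen' : ∀ n, n ∈ seen ↔ n ∈ (pre ++ [ch]).map pvSrc := by
          intro n
          simp only [List.map_append, List.map_cons, List.map_nil, List.mem_append,
            List.mem_singleton]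
          constructor
          · intro hn; exact Or.inl ((hseen n).mp hn)
          · rintro (hn | rfl)
            · exact (hseen n).mpr hn
            · exact h
        have hih := ih (pre ++ [ch]) seen lines
          (cites ++ [pvCite (pvSrc ch) (pre.length : Int) ch])
          (by simpa using hctx) hseen'
        rw [hlen] at hih
        simp only [PySem.Set.contains_eq_listContains, List.contains_iff_mem, h, if_true]
        rw [hih]
        simp
      · have hseen' : ∀ n, n ∈ PySem.Set.add seen (pvSrc ch) ↔ n ∈ (pre ++ [ch]).map pvSrc := by
          intro n
          rw [PySem.Set.mem_add]
          simp only [List.map_append, List.map_cons, List.map_nil, List.mem_append,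
            List.mem_singleton]
          constructor
          · rintro (hn | rfl)
            · exact Or.inl ((hseen n).mp hn)
            · exact Or.inr rfl
          · rintro (hn | rfl)
            · exact Or.inl ((hseen n).mpr hn)
            · exact Or.inr rfl
        have hnotmem : pvSrc ch ∉ pre.map pvSrc := fun hm => h ((hseen _).mpr hm)
        have hnext : pvNextA (pvSrc ch) 0 ctx = (pre.length : Int) + 1 := by
          rw [hctx, pvNextA_first (pvSrc ch) pre ch rest 0 hnotmem rfl]; ring
        have hih := ih (pre ++ [ch]) (PySem.Set.add seen (pvSrc ch))
          (lines ++ [pvLine (pvSrc ch) ((pre.length : Int) + 1)])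
          (cites ++ [pvCite (pvSrc ch) (pre.length : Int) ch])
          (by simpa using hctx) hseen'
        rw [hlen] at hih
        simp only [PySem.Set.contains_eq_listContains, List.contains_iff_mem, h, if_false]
        rw [hih]
        simp only [List.nil_append]
        rw [pvLoopA_acc ctx rest (PySem.Set.add seen (pvSrc ch))
            [(pvSrc ch, pvNextA (pvSrc ch) 0 ctx)]]
        simp [hnext, pvLine]

-- ===== VERDICT (by name: the statement is the Claim_ definition above) =====
theorem maybe_answer_filenames_spec : Claim_equal_maybe_answer_filenames := by
  intro question context_chunks _ _
  unfold Spec_maybe_answer_filenames maybe_answer_filenames maybe_answer_filenames_alt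
  by_cases hk : pvHasKw question = true
  · simp only [hk, if_true, Bool.not_true, Bool.false_eq_true, if_false]
    have h := pvLoopB_eq context_chunks context_chunks [] PySem.Set.empty [] []
      (by simp) (by intro n; simp [PySem.Set.empty])
    simp only [List.length_nil, Nat.cast_zero] at h
    rw [h]
    simp
  · simp [hk]
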